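-- pv_equiv track=rewrite | github.com/Aishwarya-Sanku/pratice | hello.py | join_with_alternating_parentheses
-- ===== SOURCE A (Python) =====
-- def join_with_alternating_parentheses(array, first_index, last_index):
--     result = ""
--
--     for i in range(first_index, last_index + 1):
--         value = array[i]
--         if (i - first_index) % 2 == 0:
--             result += value
--         else:
--             if i != last_index:
--                 result += f"({value})."
--             else:
--                 result += f"({value})"
--
--     return result
-- ===== SOURCE B (Python) =====
-- def join_with_alternating_parentheses(array, first_index, last_index):
--     groups = []
--     i = first_index
--     while i <= last_index:
--         if i + 1 <= last_index:
--             groups.append(array[i] + f"({array[i + 1]})")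
--         else:
--             groups.append(array[i])
--         i += 2
--     return ".".join(groups)
-- ===== Notes on version B (the rewrite author's own statement) =====
-- stated objective: simpler
-- what changed: Replaces the per-index parity branch with conditional trailing-dot logic by a pair-wise traversal (step 2) that builds 'even(odd)' groups and returns '.'.join(groups).
import Mathlib
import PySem

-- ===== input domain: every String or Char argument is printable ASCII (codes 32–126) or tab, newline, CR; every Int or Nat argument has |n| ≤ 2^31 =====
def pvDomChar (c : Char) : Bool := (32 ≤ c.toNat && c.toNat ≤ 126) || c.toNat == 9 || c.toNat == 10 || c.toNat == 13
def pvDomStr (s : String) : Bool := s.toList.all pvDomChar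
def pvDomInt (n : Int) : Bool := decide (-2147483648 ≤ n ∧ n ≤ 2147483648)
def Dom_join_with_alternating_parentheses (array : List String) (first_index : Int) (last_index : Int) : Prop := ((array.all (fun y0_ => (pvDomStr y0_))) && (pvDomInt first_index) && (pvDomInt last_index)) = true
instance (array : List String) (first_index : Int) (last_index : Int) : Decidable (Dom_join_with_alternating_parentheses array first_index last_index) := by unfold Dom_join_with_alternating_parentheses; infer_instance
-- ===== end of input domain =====

-- B replaces A's per-index parity branch and conditional trailing dot by a pair-wise
-- traversal building "even(odd)" groups joined with "." (objective: simpler decomposition).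

-- ===== PORT A =====
-- one step of A's loop body, with strings as char lists (PySem convention; exact)
def pvStepA (array : List String) (first_index last_index : Int)
    (result : List Char) (i : Int) : List Char :=
  let value := (PySem.List.pyGetD array i "").toList
  if PySem.Int.mod (i - first_index) 2 = 0 then
    result ++ value
  else
    if i ≠ last_index then
      result ++ ('(' :: value ++ [')', '.'])
    else
      result ++ ('(' :: value ++ [')'])

def join_with_alternating_parentheses (array : List String) (first_index : Int) (last_index : Int) : String :=
  String.ofList ((PySem.List.pyRange first_index (last_index + 1) 1).foldl
    (pvStepA array first_index last_index) [])

-- ===== PORT B =====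
-- the while-loop of Source B: from i, step 2, collect the groups
def pvGroupsB (array : List String) (last_index : Int) (i : Int) : List String :=
  if _h : i ≤ last_index then
    (if i + 1 ≤ last_index then
      String.ofList ((PySem.List.pyGetD array i "").toList ++
        ('(' :: (PySem.List.pyGetD array (i + 1) "").toList ++ [')']))
     else PySem.List.pyGetD array i "") :: pvGroupsB array last_index (i + 2)
  else []
termination_by (last_index + 1 - i).toNat
decreasing_by omega

def join_with_alternating_parentheses_alt (array : List String) (first_index : Int) (last_index : Int) : String :=
  PySem.Str.join "." (pvGroupsB array last_index first_index)

-- ===== PRECONDITION & SPEC =====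
-- Pre_ excludes exactly the inputs where A raises IndexError: some i in
-- range(first_index, last_index+1) is out of range for array (Python negative indexing allowed).
def Pre_join_with_alternating_parentheses (array : List String) (first_index : Int) (last_index : Int) : Prop :=
  last_index < first_index ∨
    (-(array.length : Int) ≤ first_index ∧ last_index < (array.length : Int))
instance (array : List String) (first_index : Int) (last_index : Int) : Decidable (Pre_join_with_alternating_parentheses array first_index last_index) := by unfold Pre_join_with_alternating_parentheses; infer_instance

def pvWitness_join_with_alternating_parentheses : List String × Int × Int := (["a", "b", "c"], 0, 2)

def Spec_join_with_alternating_parentheses (array : List String) (first_index : Int) (last_index : Int) (out : String) : Prop := out = join_with_alternating_parentheses_alt array first_index last_index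
instance (array : List String) (first_index : Int) (last_index : Int) (out : String) : Decidable (Spec_join_with_alternating_parentheses array first_index last_index out) := by unfold Spec_join_with_alternating_parentheses; infer_instance

-- ===== CLAIM (what is proved, stated in full; the proofs are below) =====
def Claim_equal_join_with_alternating_parentheses : Prop := ∀ (array : List String) (first_index : Int) (last_index : Int), Dom_join_with_alternating_parentheses array first_index last_index → Pre_join_with_alternating_parentheses array first_index last_index → Spec_join_with_alternating_parentheses array first_index last_index (join_with_alternating_parentheses array first_index last_index)

-- ===== LEMMAS AND PROOFS =====

-- main invariant: from a group start i (even offset from first_index), A's fold appends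
-- exactly the '.'-join of B's groups
lemma pvFold_eq_groups (array : List String) (first_index last_index : Int)
    (i : Int) (acc : List Char)
    (hpar : 2 ∣ i - first_index) :
    (PySem.List.pyRange i (last_index + 1) 1).foldl
      (pvStepA array first_index last_index) acc
      = acc ++ PySem.Chars.join ['.'] ((pvGroupsB array last_index i).map String.toList) := by
  by_cases hle : i ≤ last_index
  · rw [PySem.List.pyRange_one_cons (by omega)]
    by_cases hpair : i + 1 ≤ last_index
    · rw [PySem.List.pyRange_one_cons (by omega : i + 1 < last_index + 1)]
      by_cases hlast : i + 1 = last_index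
      · -- the pair ends the range: lone group "v(w)", no trailing dot
        rw [PySem.List.pyRange_one_eq_nil (by omega : last_index + 1 ≤ i + 1 + 1)]
        rw [pvGroupsB, dif_pos hle, if_pos hpair, pvGroupsB,
          dif_neg (by omega : ¬ i + 2 ≤ last_index)]
        simp [List.foldl, pvStepA, hpar, ← hlast,
          (show ¬ 2 ∣ i + 1 - first_index by omega), List.intercalate,
          PySem.Chars.join]
      · -- interior pair: "v(w)." then recurse at i+2
        have h22 : i + 1 + 1 = i + 2 := by ring
        conv_rhs => rw [pvGroupsB, dif_pos hle, if_pos hpair]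
        have hne : pvGroupsB array last_index (i + 2) ≠ [] := by
          rw [pvGroupsB, dif_pos (by omega : i + 2 ≤ last_index)]; simp
        obtain ⟨g, gs, hg⟩ := List.exists_cons_of_ne_nil hne
        rw [List.foldl_cons, List.foldl_cons, h22,
          pvFold_eq_groups array first_index last_index (i + 2) _ (by omega), hg]
        simp only [List.map_cons, PySem.Chars.join_cons_cons]
        simp [pvStepA, hpar, (show ¬ 2 ∣ i + 1 - first_index by omega), hlast]
    · -- lone final even element
      rw [PySem.List.pyRange_one_eq_nil (by omega : last_index + 1 ≤ i + 1)]
      rw [pvGroupsB, dif_pos hle, if_neg hpair, pvGroupsB,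
        dif_neg (by omega : ¬ i + 2 ≤ last_index)]
      simp [List.foldl, pvStepA, hpar, List.intercalate, PySem.Chars.join]
  · rw [PySem.List.pyRange_one_eq_nil (by omega), pvGroupsB, dif_neg hle]
    simp [PySem.Chars.join, List.intercalate]
termination_by (last_index + 1 - i).toNat
decreasing_by omega

-- ===== VERDICT (by name: the statement is the Claim_ definition above) =====
theorem join_with_alternating_parentheses_spec : Claim_equal_join_with_alternating_parentheses := by
  intro array first_index last_index _hdom _hpre
  unfold Spec_join_with_alternating_parentheses
  unfold join_with_alternating_parentheses join_with_alternating_parentheses_alt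
  rw [pvFold_eq_groups array first_index last_index first_index []
    (by omega)]
  apply String.ext  -- equality of the underlying char lists
  simp [PySem.Str.toList_join, String.toList_ofList]
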